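-- pv_equiv track=rewrite | github.com/c0derMo/advent-of-code | 2023/09/task.py | extrapolate_down
-- ===== SOURCE A (Python) =====
-- def extrapolate_down(history: list[int]) -> list[list[int]]:
--     result = [history]
--     while not all([x == 0 for x in result[-1]]):
--         new_list = []
--         for i in range(0, len(result[-1])-1):
--             new_list.append(result[-1][i + 1] - result[-1][i])
--         result.append(new_list)
--     return result
-- ===== SOURCE B (Python) =====
-- def extrapolate_down(history: list[int]) -> list[list[int]]:
--     if all(x == 0 for x in history):
--         return [history]
--     diffs = [history[i + 1] - history[i] for i in range(len(history) - 1)]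
--     return [history] + extrapolate_down(diffs)
-- ===== Notes on version B (the rewrite author's own statement) =====
-- stated objective: simpler
-- what changed: Replaces the imperative while-loop that grows the result and repeatedly re-reads its last row with a direct structural recursion: base case when the row is all zero, otherwise cons the row onto the recursion on its adjacent-difference list.
import Mathlib
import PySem

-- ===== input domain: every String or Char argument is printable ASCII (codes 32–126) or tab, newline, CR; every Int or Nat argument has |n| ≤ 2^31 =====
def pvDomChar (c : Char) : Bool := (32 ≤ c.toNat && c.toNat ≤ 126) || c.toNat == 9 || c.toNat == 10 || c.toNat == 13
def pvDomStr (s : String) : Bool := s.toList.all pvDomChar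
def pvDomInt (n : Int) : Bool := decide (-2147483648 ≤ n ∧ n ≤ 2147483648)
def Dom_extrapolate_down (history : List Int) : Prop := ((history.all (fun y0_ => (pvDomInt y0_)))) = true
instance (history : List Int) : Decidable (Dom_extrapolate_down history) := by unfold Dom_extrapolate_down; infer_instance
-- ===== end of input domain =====

-- B replaces A's imperative while-loop over the last row with a direct structural recursion
-- (all-zero base case, cons row onto recursion on its difference list); objective: simpler.


-- ===== PORT A =====
-- new_list built by the inner for-loop over range(0, len(the last row)-1)
def pvNewListA (row : List Int) : List Int :=
  (PySem.List.pyRange 0 ((row.length : Int) - 1) 1).foldl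
    (fun acc i => acc ++ [PySem.List.pyGetD row (i + 1) 0 - PySem.List.pyGetD row i 0]) []
    -- indices i and i+1 are always in range here, so pyGetD is exact for Python's row[i]

theorem pvNewListA_foldl (row : List Int) (l : List Int) (init : List Int) :
    l.foldl (fun acc i => acc ++ [PySem.List.pyGetD row (i + 1) 0 - PySem.List.pyGetD row i 0]) init
      = init ++ l.map (fun i => PySem.List.pyGetD row (i + 1) 0 - PySem.List.pyGetD row i 0) := by
  induction l generalizing init with
  | nil => simp
  | cons a t ih => simp [List.foldl_cons, ih]

theorem pvNewListA_length_lt (row : List Int)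
    (h : ¬ ((row.map (fun x => x == 0)).all id = true)) :
    (pvNewListA row).length < row.length := by
  have hne : row ≠ [] := by rintro rfl; simp at h
  have hlen : 1 ≤ row.length := List.length_pos_iff.mpr hne
  unfold pvNewListA
  rw [pvNewListA_foldl]
  simp [PySem.List.length_pyRange_one]
  omega

-- the while-loop of A: state = result (kept reversed) with its last row tracked
def pvGoA (last : List Int) (accRev : List (List Int)) : List (List Int) :=
  if (last.map (fun x => x == 0)).all id then accRev.reverse
  else
    let nl := pvNewListA last
    pvGoA nl (nl :: accRev)
termination_by last.length
decreasing_by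
  rename_i h
  exact pvNewListA_length_lt _ (by simpa using h)

def extrapolate_down (history : List Int) : List (List Int) :=
  pvGoA history [history]

-- ===== PORT B =====
def pvDiffsB (row : List Int) : List Int :=
  (PySem.List.pyRange 0 ((row.length : Int) - 1) 1).map
    (fun i => PySem.List.pyGetD row (i + 1) 0 - PySem.List.pyGetD row i 0)

theorem pvDiffsB_length_lt (row : List Int) (h : ¬ row.all (fun x => x == 0) = true) :
    (pvDiffsB row).length < row.length := by
  have hne : row ≠ [] := by rintro rfl; simp at h
  have hlen : 1 ≤ row.length := List.length_pos_iff.mpr hne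
  unfold pvDiffsB
  simp [PySem.List.length_pyRange_one]
  omega

def extrapolate_down_alt (history : List Int) : List (List Int) :=
  if history.all (fun x => x == 0) then [history]
  else history :: extrapolate_down_alt (pvDiffsB history)
termination_by history.length
decreasing_by
  rename_i h
  exact pvDiffsB_length_lt _ (by simpa using h)

-- ===== PRECONDITION & SPEC =====
def Spec_extrapolate_down (history : List Int) (out : List (List Int)) : Prop := out = extrapolate_down_alt history
instance (history : List Int) (out : List (List Int)) : Decidable (Spec_extrapolate_down history out) := by unfold Spec_extrapolate_down; infer_instance

-- ===== CLAIM (what is proved, stated in full; the proofs are below) =====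
def Claim_equal_extrapolate_down : Prop := ∀ (history : List Int), Dom_extrapolate_down history → Spec_extrapolate_down history (extrapolate_down history)

-- ===== LEMMAS AND PROOFS =====

theorem pvNewListA_eq_diffsB (row : List Int) : pvNewListA row = pvDiffsB row := by
  unfold pvNewListA pvDiffsB
  rw [pvNewListA_foldl]
  simp

-- B's result always starts with its argument
theorem alt_head (row : List Int) :
    extrapolate_down_alt row = row :: (extrapolate_down_alt row).tail := by
  rw [extrapolate_down_alt.eq_def]
  split_ifs <;> simp

theorem pvGoA_eq (last : List Int) (accRev : List (List Int)) :
    pvGoA last accRev = accRev.reverse ++ (extrapolate_down_alt last).tail := by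
  fun_induction pvGoA last accRev with
  | case1 last accRev h =>
      rw [extrapolate_down_alt.eq_def]
      have h' : last.all (fun x => x == 0) = true := by simpa using h
      simp [h']
  | case2 last accRev h nl ih =>
      have h' : ¬ last.all (fun x => x == 0) = true := by
        intro hc; exact h (by simpa using hc)
      rw [ih]
      conv_rhs => rw [extrapolate_down_alt.eq_def]
      rw [if_neg h']
      simp only [nl, pvNewListA_eq_diffsB, List.reverse_cons, List.append_assoc,
        List.singleton_append, List.tail_cons]
      rw [← alt_head]
      rw [if_neg (by simpa using h')]

-- ===== VERDICT (by name: the statement is the Claim_ definition above) =====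
theorem extrapolate_down_spec : Claim_equal_extrapolate_down := by
  intro history _
  unfold Spec_extrapolate_down extrapolate_down
  rw [pvGoA_eq]
  simpa using (alt_head history).symm
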